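-- pv_equiv track=rewrite | github.com/fangjingyan/Sprout_exercising_time | exercise_time.py | exercise_time_simplified
-- ===== SOURCE A (Python) =====
-- def exercise_time_simplified(ts, hr, min_hr, interval=120):
--     '''
--     :param ts: time step after midnight
--     :param hr: corresponding heart rate
--     :param min_hr: the minial heart rate for exercising
--     :param interval: the maximum interval allowing the user to take off the watch
--     :return: total exercising time
--     '''
--     # the length of the array
--     n = len(ts)
--     res = 0
--     in_interval = False
--     for i in range(n):
--         if hr[i] < min_hr:
--             in_interval = False
--         else:
--             if not in_interval:
--                 in_interval = True
--             else:
--                 if ts[i] - ts[i - 1] <= interval: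
--                     res += ts[i] - ts[i - 1]
--
--     return res
-- ===== SOURCE B (Python) =====
-- def exercise_time_simplified(ts, hr, min_hr, interval=120):
--     # Two-stage segment decomposition: first collect the maximal runs
--     # (segments) of consecutive timestamps whose heart rate qualifies,
--     # then sum, within each segment, the gaps that fit inside 'interval'.
--     segments = []
--     cur = []
--     for t, h in zip(ts, hr):
--         if h >= min_hr:
--             cur.append(t)
--         else:
--             if cur:
--                 segments.append(cur)
--             cur = []
--     if cur:
--         segments.append(cur)
--     total = 0
--     for seg in segments:
--         for a, b in zip(seg, seg[1:]):
--             if b - a <= interval: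
--                 total += b - a
--     return total
-- ===== Notes on version B (the rewrite author's own statement) =====
-- stated objective: alternative
-- what changed: Replaced the in_interval state machine by a two-stage decomposition: a first pass groups the data into maximal segments of consecutive qualifying points, a second pass sums the short-enough gaps within each segment.
import Mathlib
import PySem

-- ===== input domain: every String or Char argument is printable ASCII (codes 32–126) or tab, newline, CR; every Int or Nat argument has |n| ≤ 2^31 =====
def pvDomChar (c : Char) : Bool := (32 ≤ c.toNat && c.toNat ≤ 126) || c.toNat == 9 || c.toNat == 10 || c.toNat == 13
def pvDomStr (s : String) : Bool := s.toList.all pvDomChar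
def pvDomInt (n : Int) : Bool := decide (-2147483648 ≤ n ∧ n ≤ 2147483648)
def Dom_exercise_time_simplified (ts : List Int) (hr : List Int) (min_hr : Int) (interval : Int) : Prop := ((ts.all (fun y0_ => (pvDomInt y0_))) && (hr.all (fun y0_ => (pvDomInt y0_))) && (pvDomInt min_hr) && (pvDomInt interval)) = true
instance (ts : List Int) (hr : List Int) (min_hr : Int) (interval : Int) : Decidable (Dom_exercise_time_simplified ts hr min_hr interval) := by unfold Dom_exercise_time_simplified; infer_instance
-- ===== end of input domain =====

-- B replaces A's in_interval state machine by a two-stage segment decomposition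
-- (objective: alternative). Equivalence of the return values is proved on Pre_
-- (len(ts) <= len(hr), exactly where Python A returns without raising).

-- ===== PORT A =====
-- A's index loop 'for i in range(n)' rendered as structural recursion over the paired
-- points zip(ts,hr) (Pre_ gives len(hr) >= len(ts), so the pairing covers exactly the
-- indices 0..n-1 A visits); the state is A's (res, in_interval) plus prev = ts[i-1],
-- and the branches are in A's order.
def pvALoop (pts : List (Int × Int)) (res : Int) (inIv : Bool) (prev : Int)
    (min_hr : Int) (interval : Int) : Int :=
  match pts with
  | [] => res
  | (t, h) :: rest =>
    if h < min_hr then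
      pvALoop rest res false t min_hr interval
    else
      if !inIv then
        pvALoop rest res true t min_hr interval
      else
        pvALoop rest (if t - prev ≤ interval then res + (t - prev) else res) true t min_hr interval

def exercise_time_simplified (ts : List Int) (hr : List Int) (min_hr : Int) (interval : Int) : Int :=
  pvALoop (List.zip ts hr) 0 false 0 min_hr interval

-- ===== PORT B =====
-- literal port of Source B: stage 1 builds the list of maximal qualifying segments
-- (cur/segments are the loop's two accumulators, with the final flush of cur);
-- stage 2 totals, per segment, the gaps that fit in 'interval'.
def pvSegs (pts : List (Int × Int)) (cur : List Int) (segs : List (List Int))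
    (min_hr : Int) : List (List Int) :=
  match pts with
  | [] => if cur ≠ [] then segs ++ [cur] else segs
  | (t, h) :: rest =>
    if h ≥ min_hr then
      pvSegs rest (cur ++ [t]) segs min_hr
    else
      pvSegs rest [] (if cur ≠ [] then segs ++ [cur] else segs) min_hr

def pvSegGaps (seg : List Int) (interval : Int) : Int :=
  match seg with
  | a :: b :: rest => (if b - a ≤ interval then b - a else 0) + pvSegGaps (b :: rest) interval
  | _ => 0

def exercise_time_simplified_alt (ts : List Int) (hr : List Int) (min_hr : Int) (interval : Int) : Int :=
  (pvSegs (List.zip ts hr) [] [] min_hr).foldl (fun total seg => total + pvSegGaps seg interval) 0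

-- ===== PRECONDITION & SPEC =====
-- Pre_ excludes exactly the inputs where Python A raises IndexError (hr shorter than ts).
def Pre_exercise_time_simplified (ts : List Int) (hr : List Int) (min_hr : Int) (interval : Int) : Prop :=
  ts.length ≤ hr.length
instance (ts : List Int) (hr : List Int) (min_hr : Int) (interval : Int) : Decidable (Pre_exercise_time_simplified ts hr min_hr interval) := by unfold Pre_exercise_time_simplified; infer_instance

def pvWitness_exercise_time_simplified : List Int × List Int × Int × Int :=
  ([0, 30, 200, 230], [80, 90, 95, 40], 70, 120)

def Spec_exercise_time_simplified (ts : List Int) (hr : List Int) (min_hr : Int) (interval : Int) (out : Int) : Prop := out = exercise_time_simplified_alt ts hr min_hr interval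
instance (ts : List Int) (hr : List Int) (min_hr : Int) (interval : Int) (out : Int) : Decidable (Spec_exercise_time_simplified ts hr min_hr interval out) := by unfold Spec_exercise_time_simplified; infer_instance

-- ===== CLAIM (what is proved, stated in full; the proofs are below) =====
def Claim_equal_exercise_time_simplified : Prop := ∀ (ts : List Int) (hr : List Int) (min_hr : Int) (interval : Int), Dom_exercise_time_simplified ts hr min_hr interval → Pre_exercise_time_simplified ts hr min_hr interval → Spec_exercise_time_simplified ts hr min_hr interval (exercise_time_simplified ts hr min_hr interval)

-- ===== LEMMAS AND PROOFS =====

-- proof-only intermediate specification: the pairwise sum over consecutive points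
def pvPW (ts hr : List Int) (min_hr interval : Int) : Int :=
  match ts, hr with
  | t0 :: t1 :: ts', h0 :: h1 :: hr' =>
    (if h0 ≥ min_hr ∧ h1 ≥ min_hr ∧ t1 - t0 ≤ interval then t1 - t0 else 0)
      + pvPW (t1 :: ts') (h1 :: hr') min_hr interval
  | _, _ => 0

theorem pvPW_low_head (ts hr : List Int) (t h min_hr interval : Int) (hlow : h < min_hr) :
    pvPW (t :: ts) (h :: hr) min_hr interval = pvPW ts hr min_hr interval := by
  cases ts with
  | nil => cases hr <;> simp [pvPW]
  | cons t1 ts' =>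
    cases hr with
    | nil => simp [pvPW]
    | cons h1 hr' =>
      simp only [pvPW]
      rw [if_neg (by omega)]
      omega

-- the head heart rate only matters through 'h ≥ min_hr': any qualifying value works
theorem pvPW_head_hr (ts hr : List Int) (t h h' min_hr interval : Int)
    (hq : min_hr ≤ h) (hq' : min_hr ≤ h') :
    pvPW (t :: ts) (h :: hr) min_hr interval = pvPW (t :: ts) (h' :: hr) min_hr interval := by
  cases ts with
  | nil => cases hr <;> simp [pvPW]
  | cons t1 ts' =>
    cases hr with
    | nil => simp [pvPW]
    | cons h1 hr' =>
      simp only [pvPW]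
      by_cases hc : h1 ≥ min_hr ∧ t1 - t ≤ interval
      · rw [if_pos ⟨by omega, hc.1, hc.2⟩, if_pos ⟨by omega, hc.1, hc.2⟩]
      · rw [if_neg (by intro hx; exact hc ⟨hx.2.1, hx.2.2⟩),
            if_neg (by intro hx; exact hc ⟨hx.2.1, hx.2.2⟩)]

-- A's loop invariant against the pairwise sum
theorem pvALoop_inv (ts hr : List Int) (min_hr interval : Int) :
    (∀ (res prev : Int),
        pvALoop (List.zip ts hr) res false prev min_hr interval
          = res + pvPW ts hr min_hr interval)
    ∧ (∀ (res prev hprev : Int), min_hr ≤ hprev →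
        pvALoop (List.zip ts hr) res true prev min_hr interval
          = res + pvPW (prev :: ts) (hprev :: hr) min_hr interval) := by
  induction ts generalizing hr with
  | nil =>
    refine ⟨fun res prev => ?_, fun res prev hprev _ => ?_⟩ <;>
      cases hr <;> simp [pvALoop, pvPW]
  | cons t ts' ih =>
    cases hr with
    | nil =>
      refine ⟨fun res prev => ?_, fun res prev hprev _ => ?_⟩ <;>
        simp [pvALoop, pvPW]
    | cons h hr' =>
      obtain ⟨ihF, ihT⟩ := ih hr'
      constructor
      · intro res prev
        simp only [List.zip_cons_cons, pvALoop]
        by_cases hc : h < min_hr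
        · rw [if_pos hc, ihF, pvPW_low_head _ _ _ _ _ _ hc]
        · rw [if_neg hc]
          simp only [Bool.not_false, if_pos]
          rw [ihT res t h (by omega)]
      · intro res prev hprev hq
        simp only [List.zip_cons_cons, pvALoop]
        by_cases hc : h < min_hr
        · rw [if_pos hc, ihF]
          have : pvPW (prev :: t :: ts') (hprev :: h :: hr') min_hr interval
              = pvPW (t :: ts') (h :: hr') min_hr interval := by
            simp only [pvPW]; rw [if_neg (by omega)]; omega
          rw [this, pvPW_low_head _ _ _ _ _ _ hc]
        · rw [if_neg hc]
          simp only [Bool.not_true, Bool.false_eq_true, if_false]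
          rw [ihT _ t h (by omega)]
          simp only [pvPW]
          by_cases hiv : t - prev ≤ interval
          · rw [if_pos hiv, if_pos ⟨hq, by omega, hiv⟩]; omega
          · rw [if_neg hiv, if_neg (by intro hx; exact hiv hx.2.2)]; omega

-- total of a segment list
def pvTot (segs : List (List Int)) (interval : Int) : Int :=
  (segs.map (fun seg => pvSegGaps seg interval)).sum

theorem pvTot_append (segs : List (List Int)) (c : List Int) (interval : Int) :
    pvTot (segs ++ [c]) interval = pvTot segs interval + pvSegGaps c interval := by
  simp [pvTot]

theorem foldl_pvTot (segs : List (List Int)) (a interval : Int) :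
    segs.foldl (fun total seg => total + pvSegGaps seg interval) a
      = a + pvTot segs interval := by
  induction segs generalizing a with
  | nil => simp [pvTot]
  | cons s ss ih => simp [List.foldl, ih, pvTot]; ring

-- appending one more point to a nonempty segment adds exactly its gap contribution
theorem pvSegGaps_snoc (cur : List Int) (p t interval : Int) :
    pvSegGaps (cur ++ [p, t]) interval
      = pvSegGaps (cur ++ [p]) interval + (if t - p ≤ interval then t - p else 0) := by
  induction cur with
  | nil => simp [pvSegGaps]
  | cons a cur' ih =>
    cases cur' with
    | nil => simp [pvSegGaps]
    | cons b cur'' =>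
      simp only [List.cons_append, pvSegGaps] at *
      omega

-- B's segment builder against the pairwise sum
theorem pvSegs_inv (ts hr : List Int) (min_hr interval : Int) :
    (∀ segs, pvTot (pvSegs (List.zip ts hr) [] segs min_hr) interval
        = pvTot segs interval + pvPW ts hr min_hr interval)
    ∧ (∀ (cur : List Int) (p : Int) (segs),
        pvTot (pvSegs (List.zip ts hr) (cur ++ [p]) segs min_hr) interval
          = pvTot segs interval + pvSegGaps (cur ++ [p]) interval
            + pvPW (p :: ts) (min_hr :: hr) min_hr interval) := by
  induction ts generalizing hr with
  | nil =>
    refine ⟨fun segs => ?_, fun cur p segs => ?_⟩ <;>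
      cases hr <;> simp [pvSegs, pvPW, pvTot_append]
  | cons t ts' ih =>
    cases hr with
    | nil =>
      refine ⟨fun segs => ?_, fun cur p segs => ?_⟩ <;>
        simp [pvSegs, pvPW, pvTot_append]
    | cons h hr' =>
      obtain ⟨ihE, ihN⟩ := ih hr'
      constructor
      · intro segs
        simp only [List.zip_cons_cons, pvSegs]
        by_cases hc : h ≥ min_hr
        · rw [if_pos hc]
          have := ihN [] t segs
          simp only [List.nil_append] at this ⊢
          rw [this, pvPW_head_hr ts' hr' t min_hr h min_hr interval le_rfl hc]
          simp [pvSegGaps]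
        · rw [if_neg hc, if_neg (show ¬(([] : List Int) ≠ []) by simp), ihE,
              pvPW_low_head _ _ _ _ _ _ (by omega)]
      · intro cur p segs
        simp only [List.zip_cons_cons, pvSegs]
        by_cases hc : h ≥ min_hr
        · rw [if_pos hc]
          have := ihN (cur ++ [p]) t segs
          simp only [List.append_assoc, List.cons_append, List.nil_append] at this ⊢
          rw [this]
          rw [pvSegGaps_snoc cur p t interval]
          have hpw : pvPW (p :: t :: ts') (min_hr :: h :: hr') min_hr interval
              = (if t - p ≤ interval then t - p else 0)
                + pvPW (t :: ts') (h :: hr') min_hr interval := by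
            simp only [pvPW]
            by_cases hiv : t - p ≤ interval
            · rw [if_pos hiv, if_pos ⟨le_rfl, hc, hiv⟩]
            · rw [if_neg hiv, if_neg (by intro hx; exact hiv hx.2.2)]
          rw [hpw, pvPW_head_hr ts' hr' t h min_hr min_hr interval hc le_rfl]
          ring
        · rw [if_neg hc]
          rw [if_pos (by simp), ihE, pvTot_append]
          have hpw : pvPW (p :: t :: ts') (min_hr :: h :: hr') min_hr interval
              = pvPW ts' hr' min_hr interval := by
            simp only [pvPW]
            rw [if_neg (by intro hx; exact hc hx.2.1)]
            rw [pvPW_low_head _ _ _ _ _ _ (by omega)]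
            omega
          rw [hpw]

-- ===== VERDICT (by name: the statement is the Claim_ definition above) =====
theorem exercise_time_simplified_spec : Claim_equal_exercise_time_simplified := by
  intro ts hr min_hr interval _ _
  unfold Spec_exercise_time_simplified exercise_time_simplified exercise_time_simplified_alt
  rw [(pvALoop_inv ts hr min_hr interval).1 0 0, foldl_pvTot,
      (pvSegs_inv ts hr min_hr interval).1 []]
  simp [pvTot]
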